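-- pv_equiv track=rewrite | github.com/myoshi2891/Algorithm-DataStructures-Math-SQL | Algorithm/Other/at coder/Other/B40/B40.py | count_divisible_pairs
-- ===== SOURCE A (Python) =====
-- from typing import List
--
-- def count_divisible_pairs(N: int, A: List[int]) -> int:
--     """
--     A[i] + A[j] が 100 の倍数 (mod 100 == 0) となる (i < j) のペア数を返す
--
--     Parameters:
--     - N: int - 配列の長さ
--     - A: List[int] - 整数配列（長さ N）
--
--     Returns:
--     - int - 条件を満たす (i, j) のペア数
--     """
--
--     mod_count: List[int] = [0] * 100  # mod 100 のカウント用配列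
--
--     for value in A:
--         mod_count[value % 100] += 1
--
--     result: int = 0
--
--     # mod が 0 または 50 の同士ペア: nC2
--     result += (mod_count[0] * (mod_count[0] - 1)) // 2
--     result += (mod_count[50] * (mod_count[50] - 1)) // 2
--
--     # mod が (r, 100 - r) の組: count[r] * count[100 - r]
--     for r in range(1, 50):
--         result += mod_count[r] * mod_count[100 - r]
--
--     return result
-- ===== SOURCE B (Python) =====
-- from typing import List
--
-- def count_divisible_pairs(N: int, A: List[int]) -> int:
--     # Single online pass: count each pair when its second element arrives.
--     seen = [0] * 100
--     result = 0
--     for value in A: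
--         m = value % 100
--         result += seen[(100 - m) % 100]
--         seen[m] += 1
--     return result
-- ===== Notes on version B (the rewrite author's own statement) =====
-- stated objective: alternative
-- what changed: Replaced the build-histogram-then-combine (nC2 for residues 0/50 plus a complementary-product loop over r=1..49) with a single online pass that, for each element, adds the count of previously seen complementary residues before recording its own residue.
import Mathlib
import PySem

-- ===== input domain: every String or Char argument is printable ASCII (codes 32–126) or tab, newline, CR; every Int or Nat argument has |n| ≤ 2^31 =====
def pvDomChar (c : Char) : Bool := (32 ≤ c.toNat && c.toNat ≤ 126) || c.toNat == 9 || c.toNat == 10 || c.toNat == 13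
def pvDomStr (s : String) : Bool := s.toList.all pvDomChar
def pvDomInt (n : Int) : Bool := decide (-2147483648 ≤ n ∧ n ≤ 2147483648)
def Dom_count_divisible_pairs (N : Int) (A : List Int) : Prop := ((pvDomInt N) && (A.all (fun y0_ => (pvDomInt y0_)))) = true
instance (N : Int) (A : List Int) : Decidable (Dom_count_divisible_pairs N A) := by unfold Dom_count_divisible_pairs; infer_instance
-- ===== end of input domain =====

-- B replaces the histogram-then-combine computation of A with a single online pass
-- (same asymptotic cost); the theorem proves the return values are equal on all inputs.


-- ===== PORT A =====
def count_divisible_pairs (N : Int) (A : List Int) : Int :=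
  let mod_count : List Int := A.foldl
    (fun mc value =>
      PySem.List.pySetD mc (PySem.Int.mod value 100)
        (PySem.List.pyGetD mc (PySem.Int.mod value 100) 0 + 1))
    (List.replicate 100 (0 : Int))
  let result : Int := 0
  let result := result + PySem.Int.floordiv
    (PySem.List.pyGetD mod_count 0 0 * (PySem.List.pyGetD mod_count 0 0 - 1)) 2
  let result := result + PySem.Int.floordiv
    (PySem.List.pyGetD mod_count 50 0 * (PySem.List.pyGetD mod_count 50 0 - 1)) 2
  let result := (PySem.List.pyRange 1 50 1).foldl
    (fun res r =>
      res + PySem.List.pyGetD mod_count r 0 * PySem.List.pyGetD mod_count (100 - r) 0)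
    result
  result

-- ===== PORT B =====
def count_divisible_pairs_alt (N : Int) (A : List Int) : Int :=
  (A.foldl
    (fun (st : List Int × Int) value =>
      let m := PySem.Int.mod value 100
      (PySem.List.pySetD st.1 m (PySem.List.pyGetD st.1 m 0 + 1),
       st.2 + PySem.List.pyGetD st.1 (PySem.Int.mod (100 - m) 100) 0))
    (List.replicate 100 (0 : Int), 0)).2

-- ===== PRECONDITION & SPEC =====
def Spec_count_divisible_pairs (N : Int) (A : List Int) (out : Int) : Prop := out = count_divisible_pairs_alt N A
instance (N : Int) (A : List Int) (out : Int) : Decidable (Spec_count_divisible_pairs N A out) := by unfold Spec_count_divisible_pairs; infer_instance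

-- ===== CLAIM (what is proved, stated in full; the proofs are below) =====
def Claim_equal_count_divisible_pairs : Prop := ∀ (N : Int) (A : List Int), Dom_count_divisible_pairs N A → Spec_count_divisible_pairs N A (count_divisible_pairs N A)

-- ===== LEMMAS AND PROOFS =====

-- A's combine step, as a function of the histogram (exactly A's post-loop computation).
def pvCombine (mc : List Int) : Int :=
  (PySem.List.pyRange 1 50 1).foldl
    (fun res r =>
      res + PySem.List.pyGetD mc r 0 * PySem.List.pyGetD mc (100 - r) 0)
    (0 + PySem.Int.floordiv (PySem.List.pyGetD mc 0 0 * (PySem.List.pyGetD mc 0 0 - 1)) 2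
       + PySem.Int.floordiv (PySem.List.pyGetD mc 50 0 * (PySem.List.pyGetD mc 50 0 - 1)) 2)

-- A's histogram step and B's paired step.
def pvHStep (mc : List Int) (value : Int) : List Int :=
  PySem.List.pySetD mc (PySem.Int.mod value 100)
    (PySem.List.pyGetD mc (PySem.Int.mod value 100) 0 + 1)

def pvPStep (st : List Int × Int) (value : Int) : List Int × Int :=
  let m := PySem.Int.mod value 100
  (PySem.List.pySetD st.1 m (PySem.List.pyGetD st.1 m 0 + 1),
   st.2 + PySem.List.pyGetD st.1 (PySem.Int.mod (100 - m) 100) 0)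

theorem pvHStep_length (mc : List Int) (v : Int) : (pvHStep mc v).length = mc.length := by
  simp [pvHStep, PySem.List.length_pySetD]

-- ((n+1)*n)//2 = (n*(n-1))//2 + n
theorem pv_fd2 (c : Int) :
    PySem.Int.floordiv ((c + 1) * c) 2 = PySem.Int.floordiv (c * (c - 1)) 2 + c := by
  rw [PySem.Int.floordiv_eq_ediv_of_pos (by norm_num), PySem.Int.floordiv_eq_ediv_of_pos (by norm_num)]
  rcases Int.even_or_odd c with ⟨k, hk⟩ | ⟨k, hk⟩
  · subst hk
    have h1 : (k + k + 1) * (k + k) = 2 * ((2 * k + 1) * k) := by ring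
    have h2 : (k + k) * (k + k - 1) = 2 * (k * (2 * k - 1)) := by ring
    rw [h1, h2, Int.mul_ediv_cancel_left _ (by norm_num), Int.mul_ediv_cancel_left _ (by norm_num)]
    ring
  · subst hk
    have h1 : (2 * k + 1 + 1) * (2 * k + 1) = 2 * ((k + 1) * (2 * k + 1)) := by ring
    have h2 : (2 * k + 1) * (2 * k + 1 - 1) = 2 * ((2 * k + 1) * k) := by ring
    rw [h1, h2, Int.mul_ediv_cancel_left _ (by norm_num), Int.mul_ediv_cancel_left _ (by norm_num)]
    ring

-- pyGetD after pySetD, Int indices, on a length-100 list.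
theorem pv_getset (mc : List Int) (hl : mc.length = 100) (m i v : Int)
    (hm0 : 0 ≤ m) (hm : m < 100) (hi0 : 0 ≤ i) (hi : i < 100) :
    PySem.List.pyGetD (PySem.List.pySetD mc m v) i 0
      = if i = m then v else PySem.List.pyGetD mc i 0 := by
  rw [PySem.List.pySetD_of_nonneg mc v hm0]
  rw [PySem.List.pyGetD_eq_getElem _ 0 hi0 (by simp [hl]; omega)]
  rw [PySem.List.pyGetD_eq_getElem _ 0 hi0 (by simp [hl]; omega)]
  rw [List.getElem_set]
  by_cases h : i = m
  · simp [h]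
  · have : ¬ (m.toNat = i.toNat) := by omega
    simp [h, this]

-- the complementary residue
theorem pv_comp (m : Int) (hm0 : 0 ≤ m) (hm : m < 100) :
    PySem.Int.mod (100 - m) 100 = if m = 0 then 0 else 100 - m := by
  rw [PySem.Int.mod_eq_emod_of_pos (by norm_num)]
  by_cases h : m = 0
  · simp [h]
  · rw [if_neg h, Int.emod_eq_of_lt (by omega) (by omega)]

-- sum form of pvCombine
theorem pvCombine_eq (mc : List Int) :
    pvCombine mc
      = (0 + PySem.Int.floordiv (PySem.List.pyGetD mc 0 0 * (PySem.List.pyGetD mc 0 0 - 1)) 2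
           + PySem.Int.floordiv (PySem.List.pyGetD mc 50 0 * (PySem.List.pyGetD mc 50 0 - 1)) 2)
        + ((PySem.List.pyRange 1 50 1).map
            (fun r => PySem.List.pyGetD mc r 0 * PySem.List.pyGetD mc (100 - r) 0)).sum := by
  unfold pvCombine
  rw [PySem.List.foldl_add]

-- the increment lemma: adding one element with residue m to the histogram raises
-- A's combined count by the current count of the complementary residue.
theorem pv_delta (mc : List Int) (hl : mc.length = 100) (m : Int)
    (hm0 : 0 ≤ m) (hm : m < 100) :
    pvCombine (PySem.List.pySetD mc m (PySem.List.pyGetD mc m 0 + 1))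
      = pvCombine mc + PySem.List.pyGetD mc (PySem.Int.mod (100 - m) 100) 0 := by
  rw [pvCombine_eq, pvCombine_eq, pv_comp m hm0 hm]
  set v := PySem.List.pyGetD mc m 0 + 1 with hv
  have hset : ∀ (i : Int), 0 ≤ i → i < 100 →
      PySem.List.pyGetD (PySem.List.pySetD mc m v) i 0
        = if i = m then v else PySem.List.pyGetD mc i 0 :=
    fun i hi0 hi => pv_getset mc hl m i v hm0 hm hi0 hi
  by_cases h0 : m = 0
  · subst h0
    have hs : ((PySem.List.pyRange 1 50 1).map
          (fun r => PySem.List.pyGetD (PySem.List.pySetD mc 0 v) r 0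
            * PySem.List.pyGetD (PySem.List.pySetD mc 0 v) (100 - r) 0))
        = ((PySem.List.pyRange 1 50 1).map
          (fun r => PySem.List.pyGetD mc r 0 * PySem.List.pyGetD mc (100 - r) 0)) := by
      apply List.map_congr_left
      intro r hr
      rw [PySem.List.mem_pyRange_one] at hr
      rw [hset r (by omega) (by omega), hset (100 - r) (by omega) (by omega)]
      rw [if_neg (by omega), if_neg (by omega)]
    rw [hs, hset 0 (by norm_num) (by norm_num), hset 50 (by norm_num) (by norm_num)]
    rw [if_pos rfl, if_neg (by norm_num), if_pos rfl, hv]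
    have := pv_fd2 (PySem.List.pyGetD mc 0 0)
    have h1 : (PySem.List.pyGetD mc 0 0 + 1) * (PySem.List.pyGetD mc 0 0 + 1 - 1)
        = (PySem.List.pyGetD mc 0 0 + 1) * PySem.List.pyGetD mc 0 0 := by ring
    rw [h1, this]
    ring
  · rw [if_neg h0]
    by_cases h50 : m = 50
    · subst h50
      have hs : ((PySem.List.pyRange 1 50 1).map
            (fun r => PySem.List.pyGetD (PySem.List.pySetD mc 50 v) r 0
              * PySem.List.pyGetD (PySem.List.pySetD mc 50 v) (100 - r) 0))
          = ((PySem.List.pyRange 1 50 1).map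
            (fun r => PySem.List.pyGetD mc r 0 * PySem.List.pyGetD mc (100 - r) 0)) := by
        apply List.map_congr_left
        intro r hr
        rw [PySem.List.mem_pyRange_one] at hr
        rw [hset r (by omega) (by omega), hset (100 - r) (by omega) (by omega)]
        rw [if_neg (by omega), if_neg (by omega)]
      rw [hs, hset 0 (by norm_num) (by norm_num), hset 50 (by norm_num) (by norm_num)]
      rw [if_neg (by norm_num), if_pos rfl, hv]
      have := pv_fd2 (PySem.List.pyGetD mc 50 0)
      have h1 : (PySem.List.pyGetD mc 50 0 + 1) * (PySem.List.pyGetD mc 50 0 + 1 - 1)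
          = (PySem.List.pyGetD mc 50 0 + 1) * PySem.List.pyGetD mc 50 0 := by ring
      rw [h1, this]
      have h2 : (100 : Int) - 50 = 50 := by norm_num
      rw [h2]
      ring
    · -- m ∉ {0, 50}: the affected term of the r-loop is r = t, t = m (if m < 50) or t = 100 - m
      have ht : ∃ t : Int, 1 ≤ t ∧ t < 50 ∧ (t = m ∨ 100 - t = m) := by
        by_cases hlt : m < 50
        · exact ⟨m, by omega, by omega, Or.inl rfl⟩
        · exact ⟨100 - m, by omega, by omega, Or.inr (by omega)⟩
      obtain ⟨t, ht1, ht2, htm⟩ := ht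
      have hsplit : PySem.List.pyRange 1 50 1
          = PySem.List.pyRange 1 t 1 ++ (t :: PySem.List.pyRange (t + 1) 50 1) := by
        rw [PySem.List.pyRange_one_append 1 t 50 (by omega) (by omega)]
        congr 1
        exact PySem.List.pyRange_one_cons (by omega)
      have hcongr : ∀ (l : List Int), (∀ r ∈ l, 1 ≤ r ∧ r < 50 ∧ r ≠ t) →
          (l.map (fun r => PySem.List.pyGetD (PySem.List.pySetD mc m v) r 0
              * PySem.List.pyGetD (PySem.List.pySetD mc m v) (100 - r) 0))
            = (l.map (fun r => PySem.List.pyGetD mc r 0 * PySem.List.pyGetD mc (100 - r) 0)) := by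
        intro l hb
        apply List.map_congr_left
        intro r hr
        obtain ⟨hr1, hr2, hr3⟩ := hb r hr
        rw [hset r (by omega) (by omega), hset (100 - r) (by omega) (by omega)]
        rw [if_neg (by omega), if_neg (by omega)]
      have hc1 : ∀ r ∈ PySem.List.pyRange 1 t 1, 1 ≤ r ∧ r < 50 ∧ r ≠ t := by
        intro r hr; rw [PySem.List.mem_pyRange_one] at hr; exact ⟨by omega, by omega, by omega⟩
      have hc2 : ∀ r ∈ PySem.List.pyRange (t + 1) 50 1, 1 ≤ r ∧ r < 50 ∧ r ≠ t := by
        intro r hr; rw [PySem.List.mem_pyRange_one] at hr; exact ⟨by omega, by omega, by omega⟩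
      rw [hsplit]
      rw [List.map_append, List.map_append, List.sum_append, List.sum_append]
      rw [List.map_cons, List.map_cons, List.sum_cons, List.sum_cons]
      rw [hcongr _ hc1, hcongr _ hc2]
      rw [hset 0 (by norm_num) (by omega), hset 50 (by norm_num) (by omega)]
      rw [if_neg (by omega), if_neg (by omega)]
      rw [hset t (by omega) (by omega), hset (100 - t) (by omega) (by omega)]
      rcases htm with h | h
      · rw [if_pos h, if_neg (by omega), hv, h]
        ring
      · rw [if_neg (by omega), if_pos h, hv]
        have h2 : (100 : Int) - m = t := by omega
        rw [h2, show (100 : Int) - t = m from h]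
        ring

-- B's loop: the result accumulator is additive in its start value.
theorem pv_shift (xs : List Int) : ∀ (mc : List Int) (res : Int),
    (xs.foldl pvPStep (mc, res)).2 = res + (xs.foldl pvPStep (mc, 0)).2 := by
  induction xs with
  | nil => intro mc res; simp
  | cons x xs ih =>
    intro mc res
    simp only [List.foldl_cons]
    rw [ih, ih (pvPStep (mc, 0) x).1]
    simp [pvPStep]
    ring

-- main invariant: A's combine of the running histogram = its start value + B's running result.
theorem pv_main (xs : List Int) : ∀ (mc : List Int), mc.length = 100 →
    pvCombine (xs.foldl pvHStep mc) = pvCombine mc + (xs.foldl pvPStep (mc, 0)).2 := by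
  induction xs with
  | nil => intro mc _; simp
  | cons x xs ih =>
    intro mc hl
    simp only [List.foldl_cons]
    have hm0 : 0 ≤ PySem.Int.mod x 100 := PySem.Int.mod_nonneg x (by norm_num)
    have hm : PySem.Int.mod x 100 < 100 := PySem.Int.mod_lt x (by norm_num)
    have hlen : (pvHStep mc x).length = 100 := by rw [pvHStep_length, hl]
    rw [ih (pvHStep mc x) hlen]
    have hstep : pvPStep (mc, 0) x
        = (pvHStep mc x, PySem.List.pyGetD mc (PySem.Int.mod (100 - PySem.Int.mod x 100) 100) 0) := by
      simp only [pvPStep, pvHStep]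
      rw [zero_add]
    rw [hstep, pv_shift]
    have := pv_delta mc hl (PySem.Int.mod x 100) hm0 hm
    rw [show pvHStep mc x
        = PySem.List.pySetD mc (PySem.Int.mod x 100) (PySem.List.pyGetD mc (PySem.Int.mod x 100) 0 + 1)
        from rfl, this,
        pv_shift xs _ (PySem.List.pyGetD mc (PySem.Int.mod (100 - PySem.Int.mod x 100) 100) 0)]
    ring

set_option maxRecDepth 8192 in
theorem pvCombine_init : pvCombine (List.replicate 100 (0 : Int)) = 0 := by decide

-- the ports, re-expressed through the helpers
theorem pvA_eq (N : Int) (A : List Int) :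
    count_divisible_pairs N A = pvCombine (A.foldl pvHStep (List.replicate 100 (0 : Int))) := by
  rfl

theorem pvB_eq (N : Int) (A : List Int) :
    count_divisible_pairs_alt N A = (A.foldl pvPStep (List.replicate 100 (0 : Int), 0)).2 := by
  rfl

-- ===== VERDICT (by name: the statement is the Claim_ definition above) =====
theorem count_divisible_pairs_spec : Claim_equal_count_divisible_pairs := by
  intro N A _
  unfold Spec_count_divisible_pairs
  rw [pvA_eq, pvB_eq, pv_main A (List.replicate 100 (0 : Int)) (by simp), pvCombine_init]
  ring
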